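-- pv_equiv track=rewrite | github.com/andypymont/adventofcode | 2015/day11.py | contains_two_pairs
-- ===== SOURCE A (Python) =====
-- def contains_two_pairs(password: str) -> bool:
--     """
--     Return True if the password contains two distinct pairs of matching characters, or False if it
--     does not.
--     """
--     prev = ''
--     count_pairs = 0
--     for letter in password:
--         if letter == prev:
--             count_pairs += 1
--             prev = ''
--         else:
--             prev = letter
--     return count_pairs >= 2
-- ===== SOURCE B (Python) =====
-- def contains_two_pairs(password: str) -> bool:
--     """Run-length decomposition: a maximal run of k equal characters holds
--     exactly k // 2 non-overlapping adjacent pairs; sum them and compare to 2."""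
--     lengths = []
--     i, n = 0, len(password)
--     while i < n:
--         j = i + 1
--         while j < n and password[j] == password[i]:
--             j += 1
--         lengths.append(j - i)
--         i = j
--     return sum(k // 2 for k in lengths) >= 2
-- ===== Notes on version B (the rewrite author's own statement) =====
-- stated objective: alternative
-- what changed: Replaced A's pair-by-pair state machine (prev flag reset on every matched pair) by a run-length encoding of the string followed by the closed-form count k//2 of pairs per maximal run.
import Mathlib
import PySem

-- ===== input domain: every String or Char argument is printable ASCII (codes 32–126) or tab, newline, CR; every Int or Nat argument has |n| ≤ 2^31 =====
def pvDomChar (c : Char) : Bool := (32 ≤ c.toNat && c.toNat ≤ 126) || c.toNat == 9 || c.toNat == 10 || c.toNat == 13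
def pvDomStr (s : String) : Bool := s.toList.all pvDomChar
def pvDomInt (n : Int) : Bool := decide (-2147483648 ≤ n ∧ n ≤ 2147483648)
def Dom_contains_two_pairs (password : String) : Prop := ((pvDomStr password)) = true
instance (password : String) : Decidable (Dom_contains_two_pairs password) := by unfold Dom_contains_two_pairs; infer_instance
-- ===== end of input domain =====

-- B replaces A's pair-by-pair prev/count state machine by run-length encoding plus the
-- closed-form count k/2 of pairs per maximal run (alternative decomposition, same cost).

-- ===== PORT A =====
-- A's for-loop over the characters, carrying (prev, count); prev = '' is modelled as none.
def containsTwoPairsLoopA : Option Char → Nat → List Char → Nat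
  | _, count, [] => count
  | prev, count, letter :: rest =>
    if some letter = prev then containsTwoPairsLoopA none (count + 1) rest
    else containsTwoPairsLoopA (some letter) count rest

def contains_two_pairs (password : String) : Bool :=
  decide (2 ≤ containsTwoPairsLoopA none 0 password.toList)

-- ===== PORT B =====
-- B's inner while loop: how far the run of the current character extends into the rest.
def countRun (c : Char) : List Char → Nat
  | [] => 0
  | x :: rest => if x = c then countRun c rest + 1 else 0

-- B's outer while loop over i, phrased on the remaining suffix: collect run lengths.
def runLengths : List Char → List Nat
  | [] => []
  | c :: rest => (1 + countRun c rest) :: runLengths (rest.drop (countRun c rest))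
termination_by l => l.length
decreasing_by simp only [List.length_drop, List.length_cons]; omega

def contains_two_pairs_alt (password : String) : Bool :=
  decide (2 ≤ ((runLengths password.toList).map (fun k => k / 2)).sum)

-- ===== PRECONDITION & SPEC =====
def Spec_contains_two_pairs (password : String) (out : Bool) : Prop := out = contains_two_pairs_alt password
instance (password : String) (out : Bool) : Decidable (Spec_contains_two_pairs password out) := by unfold Spec_contains_two_pairs; infer_instance

-- ===== CLAIM (what is proved, stated in full; the proofs are below) =====
def Claim_equal_contains_two_pairs : Prop := ∀ (password : String), Dom_contains_two_pairs password → Spec_contains_two_pairs password (contains_two_pairs password)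

-- ===== LEMMAS AND PROOFS =====
-- Proof-side intermediary: count of non-overlapping adjacent equal pairs, skipping two on a match.
def skipPairs : List Char → Nat
  | [] => 0
  | [_] => 0
  | a :: b :: rest =>
    if a = b then skipPairs rest + 1
    else skipPairs (b :: rest)

-- A's loop state (prev, count) is count plus the skip-count of prev's pending character prepended.
theorem loopA_eq_skip (l : List Char) : ∀ (prev : Option Char) (count : Nat),
    containsTwoPairsLoopA prev count l =
      count + skipPairs ((prev.toList) ++ l) := by
  induction l with
  | nil =>
    intro prev count
    cases prev <;> simp [containsTwoPairsLoopA, skipPairs]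
  | cons c rest ih =>
    intro prev count
    cases prev with
    | none =>
      simp only [containsTwoPairsLoopA, reduceCtorEq, if_false,
        Option.toList, List.nil_append]
      rw [ih (some c) count]
      rfl
    | some p =>
      by_cases h : c = p
      · subst h
        simp only [containsTwoPairsLoopA, if_true]
        rw [ih none (count + 1)]
        simp [skipPairs]
        omega
      · have h' : ¬ (some c = some p) := by simp [h]
        simp only [containsTwoPairsLoopA, if_neg h']
        rw [ih (some c) count]
        simp only [Option.toList, List.cons_append, List.nil_append, skipPairs]
        rw [if_neg (fun h2 => h h2.symm)]

theorem countRun_take (l : List Char) (c : Char) :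
    l = List.replicate (countRun c l) c ++ l.drop (countRun c l) := by
  induction l with
  | nil => simp [countRun]
  | cons x rest ih =>
    by_cases h : x = c
    · subst h
      simp only [countRun, if_true, List.replicate_succ, List.cons_append, List.drop_succ_cons]
      exact congrArg _ ih
    · simp [countRun, h]

theorem countRun_drop_head (l : List Char) (c : Char) :
    (l.drop (countRun c l)).head? ≠ some c := by
  induction l with
  | nil => simp [countRun]
  | cons x rest ih =>
    by_cases h : x = c
    · subst h
      simp only [countRun, if_true, List.drop_succ_cons]
      exact ih
    · simp [countRun, h]

theorem skip_replicate (k : Nat) : ∀ (c : Char) (t : List Char), t.head? ≠ some c →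
    skipPairs (List.replicate k c ++ t) = k / 2 + skipPairs t := by
  induction k using Nat.twoStepInduction with
  | zero => intro c t _; simp
  | one =>
    intro c t ht
    simp only [List.replicate_succ, List.replicate_zero, List.cons_append, List.nil_append]
    cases t with
    | nil => simp [skipPairs]
    | cons b r =>
      have hb : b ≠ c := by simpa using ht
      have hcb : c ≠ b := fun h => hb h.symm
      simp [skipPairs, hcb]
  | more k ih _ =>
    intro c t ht
    have : List.replicate (k + 2) c ++ t = c :: c :: (List.replicate k c ++ t) := by
      simp [List.replicate_succ]
    rw [this]
    have hstep : skipPairs (c :: c :: (List.replicate k c ++ t)) =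
        skipPairs (List.replicate k c ++ t) + 1 := by simp [skipPairs]
    rw [hstep, ih c t ht]
    omega

theorem skip_eq_runs_aux (n : Nat) : ∀ (l : List Char), l.length ≤ n →
    skipPairs l = ((runLengths l).map (fun k => k / 2)).sum := by
  induction n with
  | zero =>
    intro l hl
    have : l = [] := List.eq_nil_of_length_eq_zero (Nat.le_zero.mp hl)
    subst this
    simp [runLengths, skipPairs]
  | succ n ihn =>
    intro l hl
    cases l with
    | nil => simp [runLengths, skipPairs]
    | cons c rest =>
    have ih : skipPairs (rest.drop (countRun c rest)) =
        ((runLengths (rest.drop (countRun c rest))).map (fun k => k / 2)).sum := by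
      apply ihn
      simp only [List.length_drop]
      simp only [List.length_cons] at hl
      omega
    have hdec : c :: rest = List.replicate (1 + countRun c rest) c ++ rest.drop (countRun c rest) := by
      have := countRun_take rest c
      calc c :: rest = c :: (List.replicate (countRun c rest) c ++ rest.drop (countRun c rest)) := by
            exact congrArg _ this
        _ = List.replicate (1 + countRun c rest) c ++ rest.drop (countRun c rest) := by
            simp [Nat.add_comm, List.replicate_succ]
    rw [runLengths]
    conv_lhs => rw [hdec]
    rw [skip_replicate _ c _ (countRun_drop_head rest c)]
    simp only [List.map_cons, List.sum_cons, ih]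

theorem skip_eq_runs (l : List Char) :
    skipPairs l = ((runLengths l).map (fun k => k / 2)).sum :=
  skip_eq_runs_aux l.length l (Nat.le_refl _)

-- ===== VERDICT (by name: the statement is the Claim_ definition above) =====
theorem contains_two_pairs_spec : Claim_equal_contains_two_pairs := by
  intro password _
  unfold Spec_contains_two_pairs contains_two_pairs contains_two_pairs_alt
  rw [loopA_eq_skip, skip_eq_runs]
  simp
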